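-- pv_equiv track=rewrite | github.com/Gyaha/AOC2015 | day03.py | count_visited_with_robot
-- ===== SOURCE A (Python) =====
-- def count_visited_with_robot(s: str) -> int:
--     sx, sy, rx, ry = 0, 0, 0, 0
--     robot = False
--     v = set([(0, 0)])
--     for l in s:
--         if robot:
--             rx, ry = move(rx, ry, l)
--             v.add((rx, ry))
--         else:
--             sx, sy = move(sx, sy, l)
--             v.add((sx, sy))
--         robot = not robot
--     return len(v)
--
-- def move(x: int, y: int, c: str) -> tuple([int, int]):
--     if c == "<":
--         x -= 1
--     elif c == ">":
--         x += 1
--     elif c == "^":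
--         y += 1
--     else:
--         y -= 1
--     return x, y
-- ===== SOURCE B (Python) =====
-- def count_visited_with_robot(s: str) -> int:
--     visited = {(0, 0)}
--     for part in (s[0::2], s[1::2]):
--         x, y = 0, 0
--         for c in part:
--             if c == "<":
--                 x -= 1
--             elif c == ">":
--                 x += 1
--             elif c == "^":
--                 y += 1
--             else:
--                 y -= 1
--             visited.add((x, y))
--     return len(visited)
-- ===== Notes on version B (the rewrite author's own statement) =====
-- stated objective: alternative
-- what changed: A interleaves one toggled loop over the whole string with a boolean robot flag and four state variables; B slices the string into the two agents' move subsequences (s[0::2], s[1::2]) and walks each independently from the origin into a shared visited set.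
import Mathlib
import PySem

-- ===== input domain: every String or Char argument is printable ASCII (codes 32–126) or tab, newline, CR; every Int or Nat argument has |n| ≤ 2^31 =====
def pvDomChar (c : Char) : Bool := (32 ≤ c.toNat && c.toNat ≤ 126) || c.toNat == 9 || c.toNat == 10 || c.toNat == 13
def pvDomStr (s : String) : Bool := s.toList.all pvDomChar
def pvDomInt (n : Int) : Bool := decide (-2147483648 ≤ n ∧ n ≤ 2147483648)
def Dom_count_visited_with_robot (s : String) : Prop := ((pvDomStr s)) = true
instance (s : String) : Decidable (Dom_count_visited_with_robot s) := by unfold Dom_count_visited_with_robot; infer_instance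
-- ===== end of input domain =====

-- B replaces A's single interleaved loop (toggled robot flag, four coordinates) by two
-- independent walks over the sliced subsequences s[0::2] and s[1::2] into a shared set.

-- ===== PORT A =====
-- helper 'move' of Source A
def pvMove (x y : Int) (c : Char) : Int × Int :=
  if c = '<' then (x - 1, y)
  else if c = '>' then (x + 1, y)
  else if c = '^' then (x, y + 1)
  else (x, y - 1)

-- the 'for l in s' loop of A, state (sx, sy, rx, ry, robot, v)
def pvLoopA : List Char → Int → Int → Int → Int → Bool → PySem.Set (Int × Int) → PySem.Set (Int × Int)
  | [], _, _, _, _, _, v => v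
  | c :: rest, sx, sy, rx, ry, robot, v =>
    if robot then
      let p := pvMove rx ry c
      pvLoopA rest sx sy p.1 p.2 (!robot) (PySem.Set.add v p)
    else
      let p := pvMove sx sy c
      pvLoopA rest p.1 p.2 rx ry (!robot) (PySem.Set.add v p)

def count_visited_with_robot (s : String) : Int :=
  PySem.Set.len (pvLoopA s.toList 0 0 0 0 false (PySem.Set.ofList [((0 : Int), (0 : Int))]))

-- ===== PORT B =====
-- the inner 'for c in part' loop of Source B, state (x, y, visited)
def pvWalk : List Char → Int → Int → PySem.Set (Int × Int) → PySem.Set (Int × Int)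
  | [], _, _, v => v
  | c :: rest, x, y, v =>
    if c = '<' then pvWalk rest (x - 1) y (PySem.Set.add v (x - 1, y))
    else if c = '>' then pvWalk rest (x + 1) y (PySem.Set.add v (x + 1, y))
    else if c = '^' then pvWalk rest x (y + 1) (PySem.Set.add v (x, y + 1))
    else pvWalk rest x (y - 1) (PySem.Set.add v (x, y - 1))

def count_visited_with_robot_alt (s : String) : Int :=
  let visited := PySem.Set.ofList [((0 : Int), (0 : Int))]
  -- 'for part in (s[0::2], s[1::2])', unrolled over the two-element tuple
  let visited := pvWalk ((PySem.Str.slice? s (some 0) none 2).getD "").toList 0 0 visited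
  let visited := pvWalk ((PySem.Str.slice? s (some 1) none 2).getD "").toList 0 0 visited
  PySem.Set.len visited

-- ===== PRECONDITION & SPEC =====
def Spec_count_visited_with_robot (s : String) (out : Int) : Prop := out = count_visited_with_robot_alt s
instance (s : String) (out : Int) : Decidable (Spec_count_visited_with_robot s out) := by unfold Spec_count_visited_with_robot; infer_instance

-- ===== CLAIM (what is proved, stated in full; the proofs are below) =====
def Claim_equal_count_visited_with_robot : Prop := ∀ (s : String), Dom_count_visited_with_robot s → Spec_count_visited_with_robot s (count_visited_with_robot s)

-- ===== LEMMAS AND PROOFS =====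

-- the elements at even / odd indices
def pvEvens {α : Type} : List α → List α
  | [] => []
  | [a] => [a]
  | a :: _ :: t => a :: pvEvens t

def pvOdds {α : Type} (l : List α) : List α := pvEvens l.tail

theorem pvEvens_cons {α : Type} (c : α) (l : List α) : pvEvens (c :: l) = c :: pvOdds l := by
  cases l <;> simp [pvEvens, pvOdds]

-- s[0::2] as filterMap over a range equals pvEvens
theorem filterMap_evens {α : Type} (t : List α) :
    List.filterMap (fun k => t[2 * k]?) (List.range ((t.length + 1) / 2)) = pvEvens t := by
  induction t using pvEvens.induct with
  | case1 => simp [pvEvens]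
  | case2 a => simp [pvEvens, List.range_succ_eq_map]
  | case3 a b t ih =>
      have hlen : ((a :: b :: t).length + 1) / 2 = (t.length + 1) / 2 + 1 := by
        simp; omega
      rw [hlen, List.range_succ_eq_map]
      simp only [List.filterMap_cons, List.filterMap_map]
      have : (fun k => (a :: b :: t)[2 * Nat.succ k]?) = (fun k => t[2 * k]?) := by
        funext k
        have h2 : 2 * Nat.succ k = 2 * k + 1 + 1 := by omega
        rw [h2]
        simp
      simp [pvEvens, this, ih]

theorem slice2_evens {α : Type} (xs : List α) :
    PySem.List.slice? xs (some 0) none 2 = some (pvEvens xs) := by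
  rw [← filterMap_evens]
  simp only [PySem.List.slice?, PySem.List.sliceIndices]
  norm_num
  rcases xs with _ | ⟨a, t⟩
  · simp
  · rw [if_pos (by simp : 0 < (a :: t).length)]
    rw [show ((((a :: t).length : Int) + 2 - 1) / 2).toNat = ((a :: t).length + 1) / 2 from by
      simp only [List.length_cons]; push_cast; omega]
    apply List.filterMap_congr
    intro k _
    congr 1

theorem slice2_odds {α : Type} (xs : List α) :
    PySem.List.slice? xs (some 1) none 2 = some (pvOdds xs) := by
  simp only [PySem.List.slice?, PySem.List.sliceIndices]
  norm_num
  rcases xs with _ | ⟨a, t⟩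
  · simp [pvOdds, pvEvens]
  · rcases t with _ | ⟨b, r⟩
    · simp [pvOdds, pvEvens]
    · rw [if_pos (by simp : 1 < (a :: b :: r).length)]
      rw [show min (1 : Int) (((a :: b :: r).length : Int)) = 1 from by
        simp only [List.length_cons]; push_cast; omega]
      rw [show ((((a :: b :: r).length : Int) - 1 + 2 - 1) / 2).toNat
            = ((b :: r).length + 1) / 2 from by
        simp only [List.length_cons]; push_cast; omega]
      simp only [pvOdds, List.tail_cons]
      rw [← filterMap_evens (b :: r)]
      apply List.filterMap_congr
      intro k _
      rw [show ((1 : Int) + 2 * (k : Int)).toNat = 2 * k + 1 from by omega]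
      simp

-- successive positions of one agent walking moves from (x, y)
def pvPos (x y : Int) : List Char → List (Int × Int)
  | [] => []
  | c :: rest => pvMove x y c :: pvPos (pvMove x y c).1 (pvMove x y c).2 rest

theorem mem_pvWalk (l : List Char) (x y : Int) (v : PySem.Set (Int × Int)) (p : Int × Int) :
    p ∈ pvWalk l x y v ↔ p ∈ v ∨ p ∈ pvPos x y l := by
  induction l generalizing x y v with
  | nil => simp [pvWalk, pvPos]
  | cons c rest ih =>
      simp only [pvWalk, pvPos, pvMove]
      split_ifs <;>
        simp_all [PySem.Set.mem_add] <;> tauto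

theorem nodup_pvWalk (l : List Char) (x y : Int) (v : PySem.Set (Int × Int)) (h : v.Nodup) :
    (pvWalk l x y v).Nodup := by
  induction l generalizing x y v with
  | nil => exact h
  | cons c rest ih =>
      simp only [pvWalk]
      split_ifs <;> exact ih _ _ _ (PySem.Set.nodup_add _ _ h)

theorem mem_pvLoopA (l : List Char) (sx sy rx ry : Int) (robot : Bool)
    (v : PySem.Set (Int × Int)) (p : Int × Int) :
    p ∈ pvLoopA l sx sy rx ry robot v ↔ p ∈ v ∨
      (if robot then p ∈ pvPos rx ry (pvEvens l) ∨ p ∈ pvPos sx sy (pvOdds l)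
       else p ∈ pvPos sx sy (pvEvens l) ∨ p ∈ pvPos rx ry (pvOdds l)) := by
  induction l generalizing sx sy rx ry robot v with
  | nil => cases robot <;> simp [pvLoopA, pvPos, pvOdds, pvEvens]
  | cons c rest ih =>
      cases robot <;>
        · simp only [pvLoopA, pvEvens_cons, pvOdds, List.tail_cons, pvPos]
          simp [ih, PySem.Set.mem_add]
          tauto

theorem nodup_pvLoopA (l : List Char) (sx sy rx ry : Int) (robot : Bool)
    (v : PySem.Set (Int × Int)) (h : v.Nodup) :
    (pvLoopA l sx sy rx ry robot v).Nodup := by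
  induction l generalizing sx sy rx ry robot v with
  | nil => exact h
  | cons c rest ih =>
      simp only [pvLoopA]
      split_ifs <;> exact ih _ _ _ _ _ _ (PySem.Set.nodup_add _ _ h)

-- ===== VERDICT (by name: the statement is the Claim_ definition above) =====
theorem count_visited_with_robot_spec : Claim_equal_count_visited_with_robot := by
  intro s _
  unfold Spec_count_visited_with_robot count_visited_with_robot count_visited_with_robot_alt
  have hse : (PySem.Str.slice? s (some 0) none 2).getD "" = String.ofList (pvEvens s.toList) := by
    simp [PySem.Str.slice?, PySem.Chars.slice?_eq_listSlice?, slice2_evens]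
  have hso : (PySem.Str.slice? s (some 1) none 2).getD "" = String.ofList (pvOdds s.toList) := by
    simp [PySem.Str.slice?, PySem.Chars.slice?_eq_listSlice?, slice2_odds]
  rw [hse, hso]
  simp only [PySem.Set.len]
  norm_cast
  have hv0 : (PySem.Set.ofList [((0 : Int), (0 : Int))]).Nodup := PySem.Set.nodup_ofList _
  apply List.Perm.length_eq
  rw [List.perm_ext_iff_of_nodup
    (nodup_pvLoopA _ _ _ _ _ _ _ hv0)
    (nodup_pvWalk _ _ _ _ (nodup_pvWalk _ _ _ _ hv0))]
  intro p
  rw [mem_pvLoopA, mem_pvWalk, mem_pvWalk]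
  simp only [String.toList_ofList, Bool.false_eq_true, if_false]
  tauto
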